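-- pv_equiv track=rewrite | github.com/bioinformatics-ua/biocreativeVII_track2 | src/annotator/data.py | pad_sequence_for_bertseq_center
-- ===== SOURCE A (Python) =====
-- def pad_sequence_for_bertseq_center(sequence, value):
--     #
--     # Guarantee that the output sequence:
--     #   (1) has 128 padding values at left.
--     #   (2) has (at least) 128 padding values at right.
--     #   (3) it is divisible by 256.
--     #   (4) has at least 512 values.
--     #
--     n_mid = len(sequence)
--
--     n_left = 128
--     rest = len(sequence) % 128
--     if rest == 0:
--         remaining = 0
--     else:
--         remaining = 128 - rest
--     n_right = remaining + 128
--
--     if (n_left + n_mid + n_right) % 256 != 0: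
--         n_right += 128
--
--     while (n_left + n_mid + n_right) < 512:
--         n_right += 256
--
--     left = n_left * [value]
--     right = n_right * [value]
--
--     return left + sequence + right
-- ===== SOURCE B (Python) =====
-- def pad_sequence_for_bertseq_center(sequence, value):
--     # Closed-form padding: total length = 256 + len rounded up to a multiple
--     # of 256, floored at 512; 128 pads on the left, the rest on the right.
--     n = len(sequence)
--     total = max(256 + -(-n // 256) * 256, 512)
--     return [value] * 128 + sequence + [value] * (total - 128 - n)
-- ===== Notes on version B (the rewrite author's own statement) =====
-- stated objective: simpler
-- what changed: Replaces the stepwise padding adjustment (mod-128 remainder, conditional +128, while-loop +256) with one closed-form total length: 256 + len rounded up to a multiple of 256, floored at 512.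
import Mathlib
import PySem

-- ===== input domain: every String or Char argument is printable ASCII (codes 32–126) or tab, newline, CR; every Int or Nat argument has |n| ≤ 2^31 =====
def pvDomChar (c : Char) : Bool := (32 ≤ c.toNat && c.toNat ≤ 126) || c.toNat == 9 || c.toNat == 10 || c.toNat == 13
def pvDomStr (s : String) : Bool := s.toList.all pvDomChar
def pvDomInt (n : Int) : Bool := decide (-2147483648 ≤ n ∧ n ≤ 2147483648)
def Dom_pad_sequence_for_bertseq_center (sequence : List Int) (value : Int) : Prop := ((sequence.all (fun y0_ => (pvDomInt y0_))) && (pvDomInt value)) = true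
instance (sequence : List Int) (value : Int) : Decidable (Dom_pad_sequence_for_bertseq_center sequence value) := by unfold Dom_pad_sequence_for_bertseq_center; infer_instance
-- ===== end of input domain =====

-- ===== PORT A =====
def padWhile (n_left n_mid n_right : Int) : Int :=
  if n_left + n_mid + n_right < 512 then padWhile n_left n_mid (n_right + 256) else n_right
termination_by (512 - (n_left + n_mid + n_right)).toNat
decreasing_by omega

-- Pads `sequence` with 128 copies of `value` on the left and enough on the right
-- (A: if/while adjustment; B: closed-form ceiling arithmetic — equal return values).
def pad_sequence_for_bertseq_center (sequence : List Int) (value : Int) : List Int :=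
  let n_mid : Int := sequence.length
  let n_left : Int := 128
  let rest : Int := PySem.Int.mod (sequence.length : Int) 128
  let remaining : Int := if rest = 0 then 0 else 128 - rest
  let n_right : Int := remaining + 128
  let n_right : Int := if PySem.Int.mod (n_left + n_mid + n_right) 256 ≠ 0 then n_right + 128 else n_right
  let n_right : Int := padWhile n_left n_mid n_right
  let left := List.replicate n_left.toNat value
  let right := List.replicate n_right.toNat value
  left ++ sequence ++ right

-- ===== PORT B =====
def pad_sequence_for_bertseq_center_alt (sequence : List Int) (value : Int) : List Int :=
  let n : Int := sequence.length
  let total : Int := max (256 + -(PySem.Int.floordiv (-n) 256) * 256) 512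
  List.replicate 128 value ++ sequence ++ List.replicate (total - 128 - n).toNat value

-- ===== PRECONDITION & SPEC =====
def Spec_pad_sequence_for_bertseq_center (sequence : List Int) (value : Int) (out : List Int) : Prop := out = pad_sequence_for_bertseq_center_alt sequence value
instance (sequence : List Int) (value : Int) (out : List Int) : Decidable (Spec_pad_sequence_for_bertseq_center sequence value out) := by unfold Spec_pad_sequence_for_bertseq_center; infer_instance

-- ===== CLAIM (what is proved, stated in full; the proofs are below) =====
def Claim_equal_pad_sequence_for_bertseq_center : Prop := ∀ (sequence : List Int) (value : Int), Dom_pad_sequence_for_bertseq_center sequence value → Spec_pad_sequence_for_bertseq_center sequence value (pad_sequence_for_bertseq_center sequence value)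

-- ===== LEMMAS AND PROOFS =====

theorem padWhile_once (a b c : Int) (h1 : 256 ≤ a + b + c) (h2 : (a + b + c) % 256 = 0) :
    padWhile a b c = if a + b + c < 512 then c + 256 else c := by
  rw [padWhile]
  split_ifs with h
  · rw [padWhile, if_neg (by omega)]
  · rfl


-- ===== VERDICT (by name: the statement is the Claim_ definition above) =====
theorem pad_sequence_for_bertseq_center_spec : Claim_equal_pad_sequence_for_bertseq_center := by
  intro sequence value _
  unfold Spec_pad_sequence_for_bertseq_center
  unfold pad_sequence_for_bertseq_center pad_sequence_for_bertseq_center_alt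
  have hn0 : (0:Int) ≤ (sequence.length : Int) := Int.natCast_nonneg _
  simp only [PySem.Int.mod_eq_emod_of_pos (by norm_num : (0:Int) < 128),
    PySem.Int.mod_eq_emod_of_pos (by norm_num : (0:Int) < 256),
    PySem.Int.floordiv_eq_ediv_of_pos (by norm_num : (0:Int) < 256)]
  rw [padWhile_once _ _ _ (by split_ifs <;> omega) (by split_ifs <;> omega)]
  congr 1
  congr 1
  split_ifs <;> (congr 1; omega)
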